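-- pv_equiv track=rewrite | github.com/RDFLib/rdflib-zodb | pow_zodb/ZODB.py | __makeSlices
-- ===== SOURCE A (Python) =====
-- def __makeSlices(items, thresh=100000, single_serving=False):
--     if not single_serving:
--         items = sorted(items)
--         _min = items[0]
--         _last = items[0]
--         for cur in items:
--             if _last - cur > thresh:
--                 yield (_min, _last)
--                 _min = cur
--             _last = cur
--         yield(_min, _last)
--     else:
--         yield (min(items), max(items))
-- ===== SOURCE B (Python) =====
-- def __makeSlices(items, thresh=100000, single_serving=False):
--     if single_serving:
--         yield (min(items), max(items))
--         return
--     s = sorted(items)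
--     prev = [s[0]] + s
--     starts = [0] + [i for i in range(len(s)) if prev[i] - s[i] > thresh]
--     for a, b in zip(starts, starts[1:] + [len(s)]):
--         yield (s[a], prev[b])
-- ===== Notes on version B (the rewrite author's own statement) =====
-- stated objective: alternative
-- what changed: B replaces A's streaming generator state machine (threading _min/_last through one yielding loop) by staged passes: build a shifted prev list, compute the break indices with a range filter, then zip consecutive start indices to emit (s[a], prev[b]) pairs.
import Mathlib
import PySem

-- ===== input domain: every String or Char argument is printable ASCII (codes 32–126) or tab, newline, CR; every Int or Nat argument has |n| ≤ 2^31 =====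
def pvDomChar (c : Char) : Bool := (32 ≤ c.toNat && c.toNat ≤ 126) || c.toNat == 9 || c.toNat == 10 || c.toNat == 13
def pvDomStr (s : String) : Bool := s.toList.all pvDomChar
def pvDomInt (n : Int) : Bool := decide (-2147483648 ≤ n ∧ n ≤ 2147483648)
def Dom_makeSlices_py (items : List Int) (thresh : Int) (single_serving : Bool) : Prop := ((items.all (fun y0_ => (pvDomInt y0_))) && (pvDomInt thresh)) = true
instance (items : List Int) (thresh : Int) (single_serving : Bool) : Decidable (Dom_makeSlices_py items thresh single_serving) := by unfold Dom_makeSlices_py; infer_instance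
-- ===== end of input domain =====

-- B replaces A's streaming state machine by staged passes: a shifted prev list, a
-- range-filter computing the break indices, then a zip of consecutive start indices
-- emitting (s[a], prev[b]); same return values, Pre_ excludes only the empty list.

-- ===== PORT A =====
-- A's generator loop: state (_min, _last, accumulated yields)
def pvLoopA : List Int → Int → Int → Int → List (Int × Int) → List (Int × Int)
  | [], _, mn, last, acc => acc ++ [(mn, last)]
  | cur :: rest, t, mn, last, acc =>
    if last - cur > t then pvLoopA rest t cur cur (acc ++ [(mn, last)])
    else pvLoopA rest t mn cur acc

def makeSlices_py (items : List Int) (thresh : Int) (single_serving : Bool) : List (Int × Int) :=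
  if !single_serving then
    let s := PySem.List.sorted items (fun x => x) false
    if s = [] then []   -- unreachable under Pre_ (items[0] raises IndexError)
    else pvLoopA s thresh (s.headD 0) (s.headD 0) []
  else
    -- min(items)/max(items); none = ValueError, unreachable under Pre_
    (PySem.List.min? items (fun x => x)).elim []
      (fun a => (PySem.List.max? items (fun x => x)).elim [] (fun b => [(a, b)]))

-- ===== PORT B =====
def makeSlices_py_alt (items : List Int) (thresh : Int) (single_serving : Bool) : List (Int × Int) :=
  if single_serving then
    (PySem.List.min? items (fun x => x)).elim []
      (fun a => (PySem.List.max? items (fun x => x)).elim [] (fun b => [(a, b)]))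
  else
    let s := PySem.List.sorted items (fun x => x) false
    match s with
    | [] => []   -- unreachable under Pre_ (s[0] raises IndexError)
    | s0 :: _ =>
      let prev := s0 :: s
      let starts : List Nat :=
        0 :: (List.range s.length).filter (fun i => prev.getD i 0 - s.getD i 0 > thresh)
      (starts.zip (starts.tail ++ [s.length])).map
        (fun ab => (s.getD ab.1 0, prev.getD ab.2 0))

-- ===== PRECONDITION & SPEC =====
-- Pre_ excludes only the empty list, on which A raises (IndexError in the non-single branch, ValueError in the single branch).
def Pre_makeSlices_py (items : List Int) (thresh : Int) (single_serving : Bool) : Prop := items ≠ []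
instance (items : List Int) (thresh : Int) (single_serving : Bool) : Decidable (Pre_makeSlices_py items thresh single_serving) := by unfold Pre_makeSlices_py; infer_instance
def pvWitness_makeSlices_py : List Int × Int × Bool := ([3, 1, 2], 0, false)

def Spec_makeSlices_py (items : List Int) (thresh : Int) (single_serving : Bool) (out : List (Int × Int)) : Prop := out = makeSlices_py_alt items thresh single_serving
instance (items : List Int) (thresh : Int) (single_serving : Bool) (out : List (Int × Int)) : Decidable (Spec_makeSlices_py items thresh single_serving out) := by unfold Spec_makeSlices_py; infer_instance

-- ===== CLAIM (what is proved, stated in full; the proofs are below) =====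
def Claim_equal_makeSlices_py : Prop := ∀ (items : List Int) (thresh : Int) (single_serving : Bool), Dom_makeSlices_py items thresh single_serving → Pre_makeSlices_py items thresh single_serving → Spec_makeSlices_py items thresh single_serving (makeSlices_py items thresh single_serving)

-- ===== LEMMAS AND PROOFS =====

-- common recursive characterisation: rec t last min s
def pvRec (t : Int) : Int → Int → List Int → List (Int × Int)
  | l, mn, [] => [(mn, l)]
  | l, mn, c :: cs => if l - c > t then (mn, l) :: pvRec t c c cs else pvRec t c mn cs

-- break indices of s with previous-value sequence l, s0, s1, …
def pvBrk (t : Int) : Int → List Int → List Nat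
  | _, [] => []
  | l, c :: cs =>
    if l - c > t then 0 :: (pvBrk t c cs).map Nat.succ else (pvBrk t c cs).map Nat.succ

-- emission of pairs from a list of break indices, carrying the current group min value
def pvEmit (s prev : List Int) : Int → List Nat → List (Int × Int)
  | v, [] => [(v, prev.getD s.length 0)]
  | v, b :: bs => (v, prev.getD b 0) :: pvEmit s prev (s.getD b 0) bs

lemma pvLoopA_eq_rec : ∀ (s : List Int) (t mn l : Int) (acc : List (Int × Int)),
    pvLoopA s t mn l acc = acc ++ pvRec t l mn s := by
  intro s
  induction s with
  | nil => intro t mn l acc; simp [pvLoopA, pvRec]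
  | cons c cs ih =>
    intro t mn l acc
    simp only [pvLoopA, pvRec]
    by_cases h : l - c > t
    · simp [h, ih]
    · simp [h, ih]

lemma pvBrk_eq_filter : ∀ (s : List Int) (t l : Int),
    pvBrk t l s = (List.range s.length).filter (fun i => (l :: s).getD i 0 - s.getD i 0 > t) := by
  intro s
  induction s with
  | nil => intro t l; simp [pvBrk]
  | cons c cs ih =>
    intro t l
    simp only [pvBrk, List.length_cons, List.range_succ_eq_map, List.filter_cons,
      List.filter_map, Function.comp_def, List.getD_cons_zero, List.getD_cons_succ,
      ih, gt_iff_lt]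
    by_cases h : t < l - c
    · simp [h]
    · simp [h]

lemma pvEmit_shift : ∀ (B : List Nat) (v l c : Int) (cs : List Int),
    pvEmit (c :: cs) (l :: c :: cs) v (B.map Nat.succ) = pvEmit cs (c :: cs) v B := by
  intro B
  induction B with
  | nil => intro v l c cs; simp only [List.map_nil, pvEmit, List.length_cons]; rfl
  | cons b bs ih => intro v l c cs; simp only [List.map_cons, pvEmit, ih]; rfl

lemma pvEmit_eq_rec : ∀ (s : List Int) (t l v : Int),
    pvEmit s (l :: s) v (pvBrk t l s) = pvRec t l v s := by
  intro s
  induction s with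
  | nil => intro t l v; simp [pvBrk, pvEmit, pvRec]
  | cons c cs ih =>
    intro t l v
    simp only [pvBrk, pvRec]
    by_cases h : l - c > t
    · simp only [if_pos h, pvEmit, List.getD_cons_zero]
      rw [pvEmit_shift, ih]
    · simp only [if_neg h]
      rw [pvEmit_shift, ih]

lemma pvZip_emit : ∀ (B : List Nat) (a : Nat) (s prev : List Int),
    (((a :: B).zip (B ++ [s.length])).map
        (fun ab => (s.getD ab.1 0, prev.getD ab.2 0)))
      = pvEmit s prev (s.getD a 0) B := by
  intro B
  induction B with
  | nil => intro a s prev; simp [pvEmit]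
  | cons b bs ih =>
    intro a s prev
    have hih := ih b s prev
    simp only [List.cons_append, List.zip_cons_cons, List.map_cons, hih, pvEmit]

-- ===== VERDICT (by name: the statement is the Claim_ definition above) =====
theorem makeSlices_py_spec : Claim_equal_makeSlices_py := by
  intro items thresh single_serving _ hpre
  unfold Spec_makeSlices_py makeSlices_py makeSlices_py_alt
  cases single_serving with
  | true => simp
  | false =>
    simp only [Bool.not_false, if_true, Bool.false_eq_true, if_false]
    cases h : PySem.List.sorted items (fun x => x) false with
    | nil => simp
    | cons s0 rest =>
      simp only [List.cons_ne_nil, if_neg, not_false_iff, List.headD_cons]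
      rw [pvLoopA_eq_rec, ← pvBrk_eq_filter, List.tail_cons, pvZip_emit, pvEmit_eq_rec]
      simp [List.getD]
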